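-- pv_equiv track=rewrite | github.com/2xic-archive/gb-emulator | serial.py | getValueOfBits
-- ===== SOURCE A (Python) =====
-- def bitishigh(num, bit):
-- 	return (0 != ((num) & (1 << (bit))))
--
-- def getValueOfBits(num, listd):
-- 	minindex = min(listd)#-1
-- 	results = 0
-- 	listd[1] = listd[1] + 1
-- 	for bitposion in range(listd[0], listd[1]):
-- 		realtiveindex = ((bitposion)-minindex)
-- 		if(bitishigh(num, bitposion)):
-- 			results += (0x01 << realtiveindex)
-- 	return results
-- ===== SOURCE B (Python) =====
-- def getValueOfBits(num, listd):
--     lo = listd[0]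
--     hi = listd[1]
--     mi = min(listd)
--     listd[1] = hi + 1          # same in-place side effect as the original
--     if lo > hi:
--         return 0
--     return ((num >> lo) % (1 << (hi - lo + 1))) << (lo - mi)
-- ===== Notes on version B (the rewrite author's own statement) =====
-- stated objective: alternative
-- what changed: A tests every bit position from listd[0] to listd[1] in a loop and accumulates powers of two; B extracts the whole field at once with one arithmetic shift, one modulus by a power of two, and one shift left (the min(listd) scan dominates on the timing inputs, so no measured speed-up).
import Mathlib
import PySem

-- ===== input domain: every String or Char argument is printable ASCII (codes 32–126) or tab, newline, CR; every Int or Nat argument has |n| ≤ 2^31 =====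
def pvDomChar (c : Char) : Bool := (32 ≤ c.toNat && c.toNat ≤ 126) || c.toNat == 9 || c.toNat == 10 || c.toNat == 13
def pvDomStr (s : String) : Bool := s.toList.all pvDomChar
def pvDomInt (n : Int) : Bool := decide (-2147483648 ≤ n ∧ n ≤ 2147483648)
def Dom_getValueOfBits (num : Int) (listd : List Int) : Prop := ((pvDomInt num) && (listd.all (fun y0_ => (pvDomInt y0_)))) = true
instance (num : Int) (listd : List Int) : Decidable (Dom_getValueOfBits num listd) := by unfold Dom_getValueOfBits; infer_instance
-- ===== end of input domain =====

-- B replaces A's per-bit accumulation loop by a single shift-mod-shift closed form;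
-- both mutate listd[1] += 1 in Python — the equivalence proved here is about the
-- return value (B performs the same mutation in Source B).


-- ===== PORT A =====
-- exact for 0 ≤ bit (Python raises ValueError on a negative shift count; Pre_ excludes those inputs)
def bitishigh (num : Int) (bit : Int) : Bool :=
  decide (0 ≠ PySem.Int.band num ((1:Int) <<< bit.toNat))

def getValueOfBits (num : Int) (listd : List Int) : Int :=
  match PySem.List.min? listd (fun x => x), PySem.List.pyGet? listd 0, PySem.List.pyGet? listd 1 with
  | some minindex, some l0, some l1 =>
      -- listd[1] = listd[1] + 1 before the loop: the loop bound is l1 + 1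
      (PySem.List.pyRange l0 (l1 + 1)).foldl
        (fun results bitposion =>
          if bitishigh num bitposion then results + ((1:Int) <<< (bitposion - minindex).toNat) else results) 0
  | _, _, _ => 0   -- Python raises here (min of empty / IndexError); excluded by Pre_

-- ===== PORT B =====
def getValueOfBits_alt (num : Int) (listd : List Int) : Int :=
  match PySem.List.min? listd (fun x => x) with
  | none => 0       -- Python raises here (min of empty); excluded by Pre_
  | some mi =>
    match PySem.List.pyGet? listd 0 with
    | none => 0     -- Python raises here (IndexError); excluded by Pre_
    | some lo =>
      match PySem.List.pyGet? listd 1 with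
      | none => 0   -- Python raises here (IndexError); excluded by Pre_
      | some hi =>
        if lo > hi then 0
        else (PySem.Int.mod (num >>> lo.toNat) ((1:Int) <<< (hi - lo + 1).toNat)) <<< (lo - mi).toNat

-- ===== PRECONDITION & SPEC =====
-- Pre_ excludes exactly the inputs where Python A raises: lists with fewer than two
-- elements (IndexError / min of empty), and a non-empty bit range starting at a
-- negative position (ValueError on a negative shift count).
def Pre_getValueOfBits (num : Int) (listd : List Int) : Prop :=
  2 ≤ listd.length ∧ (listd.getD 0 0 ≤ listd.getD 1 0 → 0 ≤ listd.getD 0 0)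
instance (num : Int) (listd : List Int) : Decidable (Pre_getValueOfBits num listd) := by
  unfold Pre_getValueOfBits; infer_instance

def pvWitness_getValueOfBits : Int × List Int := (173, [2, 5])

def Spec_getValueOfBits (num : Int) (listd : List Int) (out : Int) : Prop := out = getValueOfBits_alt num listd
instance (num : Int) (listd : List Int) (out : Int) : Decidable (Spec_getValueOfBits num listd out) := by unfold Spec_getValueOfBits; infer_instance

-- ===== CLAIM (what is proved, stated in full; the proofs are below) =====
def Claim_equal_getValueOfBits : Prop := ∀ (num : Int) (listd : List Int), Dom_getValueOfBits num listd → Pre_getValueOfBits num listd → Spec_getValueOfBits num listd (getValueOfBits num listd)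

-- ===== LEMMAS AND PROOFS =====

-- floor division of a negative integer -(m+1) by 2^a, written through Nat division
lemma neg_ediv_two_pow (m a : Nat) : (-(m:Int) - 1) / (2^a : Int) = -((m / 2^a : Nat) : Int) - 1 := by
  have hb : (0:Int) < 2^a := by positivity
  rw [← PySem.Int.floordiv_eq_ediv_of_pos hb, PySem.Int.floordiv_eq_iff_of_pos hb]
  have h1 : ((2:Int)^a) * ((m / 2^a : Nat) : Int) + ((m % 2^a : Nat) : Int) = (m : Int) := by
    exact_mod_cast Nat.div_add_mod m (2^a)
  have h2 : ((m % 2^a : Nat) : Int) < 2^a := by exact_mod_cast Nat.mod_lt m (Nat.two_pow_pos a)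
  have h3 : (0:Int) ≤ ((m % 2^a : Nat) : Int) := by positivity
  constructor
  · nlinarith
  · nlinarith

-- bitishigh reads bit a of num, expressed arithmetically
lemma bitishigh_eq (num : Int) (a : Nat) :
    bitishigh num (a : Int) = decide (num / 2^a % 2 = 1) := by
  unfold bitishigh
  have hsh : ((1:Int) <<< ((a:Int)).toNat) = (((2^a : Nat) : Int)) := by
    rw [Int.toNat_natCast, Int.shiftLeft_eq, one_mul]; push_cast; ring
  rw [hsh]
  rcases (by omega : 0 ≤ num ∨ num < 0) with hpos | hneg
  · obtain ⟨m, rfl⟩ : ∃ m : Nat, num = (m : Int) := ⟨num.toNat, (Int.toNat_of_nonneg hpos).symm⟩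
    rw [PySem.Int.band_natCast, Nat.and_two_pow]
    have hdiv : (m : Int) / (2:Int)^a % 2 = (((m / 2^a) % 2 : Nat) : Int) := by push_cast; rfl
    rw [hdiv, Nat.testBit_eq_decide_div_mod_eq]
    have hp := Nat.two_pow_pos a
    rcases Nat.mod_two_eq_zero_or_one (m / 2^a) with h | h <;> simp [h] <;> first | omega | (exact_mod_cast (Nat.two_pow_pos a).ne)
  · obtain ⟨m, hm⟩ : ∃ m : Nat, num = -(m : Int) - 1 :=
      ⟨(-num - 1).toNat, by omega⟩
    subst hm
    have hband : PySem.Int.band (-(m:Int) - 1) ((2^a : Nat) : Int)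
        = ((2^a - (2^a &&& m) : Nat) : Int) := by
      rw [PySem.Int.band.eq_1]
      have h1 : ¬ (0:Int) ≤ -(m:Int) - 1 := by omega
      have h2 : (0:Int) ≤ ((2^a : Nat) : Int) := by positivity
      simp only [h1, h2, if_true, if_false]
      norm_num
      rw [show ((2:Int)^a) = ((2^a : Nat) : Int) by push_cast; ring, Int.toNat_natCast]
    rw [hband, Nat.land_comm, Nat.and_two_pow, Nat.testBit_eq_decide_div_mod_eq]
    rw [show (-(m:Int) - 1) / 2^a = -((m / 2^a : Nat) : Int) - 1 from neg_ediv_two_pow m a]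
    rw [decide_eq_decide]
    cases hb : decide (m / 2^a % 2 = 1) with
    | false =>
        have h : m / 2^a % 2 = 0 := by
          have := of_decide_eq_false hb; omega
        have hd2 : ((m / 2^a : Nat) : Int) % 2 = 0 := by exact_mod_cast h
        simp only [Bool.toNat_false, Nat.zero_mul, Nat.sub_zero]
        constructor
        · intro _; omega
        · intro _; exact_mod_cast (Nat.two_pow_pos a).ne
    | true =>
        have h : m / 2^a % 2 = 1 := of_decide_eq_true hb
        have hd2 : ((m / 2^a : Nat) : Int) % 2 = 1 := by exact_mod_cast h
        simp only [Bool.toNat_true, Nat.one_mul, Nat.sub_self, Nat.cast_zero]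
        constructor
        · intro hx; exact absurd rfl hx
        · intro hx; omega

-- peeling the low bit off an emod by a power of two
lemma emod_two_pow_succ (q : Int) (n : Nat) : q % 2^(n+1) = q % 2 + 2 * (q / 2 % 2^n) := by
  have h1 : q = q % 2 + 2 * (q / 2 % 2^n) + 2^(n+1) * (q / 2 / 2^n) := by
    have a1 := Int.emod_add_ediv q 2
    have a2 := Int.emod_add_ediv (q / 2) (2^n)
    have : (2:Int)^(n+1) = 2 * 2^n := by ring
    rw [this]; nlinarith [a1, a2]
  calc q % 2^(n+1) = (q % 2 + 2 * (q / 2 % 2^n) + 2^(n+1) * (q / 2 / 2^n)) % 2^(n+1) := by rw [← h1]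
    _ = (q % 2 + 2 * (q / 2 % 2^n)) % 2^(n+1) := by rw [Int.add_mul_emod_self_left]
    _ = q % 2 + 2 * (q / 2 % 2^n) := by
        apply Int.emod_eq_of_lt
        · have := Int.emod_nonneg q (by norm_num : (2:Int) ≠ 0)
          have := Int.emod_nonneg (q/2) (by positivity : ((2:Int)^n) ≠ 0)
          omega
        · have h2 : q % 2 < 2 := Int.emod_lt_of_pos q (by norm_num)
          have h3 : q / 2 % 2^n < 2^n := Int.emod_lt_of_pos _ (by positivity)
          have : (2:Int)^(n+1) = 2 * 2^n := by ring
          omega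

-- the loop of A over a bit range equals the masked-and-shifted field
lemma loop_closed (num mi : Int) : ∀ (n : Nat) (a : Nat) (r : Int), mi ≤ (a : Int) →
    (PySem.List.pyRange (a : Int) ((a : Int) + (n : Int))).foldl
      (fun results bitposion =>
        if bitishigh num bitposion then results + ((1:Int) <<< (bitposion - mi).toNat) else results) r
    = r + (num / 2^a % 2^n) * 2^(((a : Int) - mi).toNat) := by
  intro n
  induction n with
  | zero =>
      intro a r _
      rw [show ((a:Int) + ((0:Nat):Int)) = (a:Int) by push_cast; ring]
      rw [PySem.List.pyRange_one_eq_nil le_rfl]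
      simp
  | succ n ih =>
      intro a r hmi
      have hcons : PySem.List.pyRange (a:Int) ((a:Int) + ((n+1 : Nat):Int))
          = (a:Int) :: PySem.List.pyRange (((a+1 : Nat)):Int) ((((a+1:Nat)):Int) + ((n:Nat):Int)) := by
        rw [show ((a:Int) + ((n+1:Nat):Int)) = ((((a+1:Nat)):Int) + ((n:Nat):Int)) by push_cast; ring]
        rw [PySem.List.pyRange_one_cons (by push_cast; omega)]
        rw [show ((a:Int) + 1) = (((a+1:Nat)):Int) by push_cast; ring]
      rw [hcons]
      simp only [List.foldl_cons]
      rw [ih (a+1) _ (by push_cast; omega)]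
      -- now arithmetic
      have hs : (((a+1:Nat):Int) - mi).toNat = ((a:Int) - mi).toNat + 1 := by omega
      have hq : num / 2^(a+1) = (num / 2^a) / 2 := by
        rw [pow_succ, ← Int.ediv_ediv_of_nonneg (show (0:Int) ≤ 2^a by positivity)]
      rw [hs, hq, bitishigh_eq]
      rw [show ((a:Int) - mi).toNat = (((a:Int)) - mi).toNat from rfl]
      have hsh : ((1:Int) <<< ((a:Int) - mi).toNat) = 2^(((a:Int)) - mi).toNat := by
        rw [Int.shiftLeft_eq, one_mul]
      rw [hsh, emod_two_pow_succ (num / 2^a) n]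
      have h2 := Int.emod_two_eq (num / 2^a)
      rcases h2 with h | h <;> simp [h] <;> ring

-- ===== VERDICT (by name: the statement is the Claim_ definition above) =====
theorem getValueOfBits_spec : Claim_equal_getValueOfBits := by
  unfold Claim_equal_getValueOfBits
  intro num listd _ hpre
  obtain ⟨hlen, hneg⟩ := hpre
  rcases listd with _ | ⟨x0, l⟩
  · simp at hlen
  rcases l with _ | ⟨x1, rest⟩
  · simp at hlen
  simp only [List.getD_cons_zero, List.getD_cons_succ] at hneg
  have hg0 : PySem.List.pyGet? (x0::x1::rest) 0 = some x0 := by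
    rw [show (0:Int) = ((0:Nat):Int) from rfl, PySem.List.pyGet?_natCast]; rfl
  have hg1 : PySem.List.pyGet? (x0::x1::rest) 1 = some x1 := by
    rw [show (1:Int) = ((1:Nat):Int) from rfl, PySem.List.pyGet?_natCast]; rfl
  obtain ⟨mi, hmi⟩ : ∃ m, PySem.List.min? (x0::x1::rest) (fun x => x) = some m := by
    rcases h : PySem.List.min? (x0::x1::rest) (fun x => x) with _ | m
    · rw [PySem.List.min?_eq_none_iff] at h; simp at h
    · exact ⟨m, rfl⟩
  have hmi0 : mi ≤ x0 := PySem.List.min?_id_le hmi x0 (by simp)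
  unfold Spec_getValueOfBits getValueOfBits getValueOfBits_alt
  rw [hmi, hg0, hg1]
  dsimp only
  by_cases hgt : x0 > x1
  · rw [if_pos hgt, PySem.List.pyRange_one_eq_nil (by omega)]
    simp
  · rw [if_neg hgt]
    have h0 : 0 ≤ x0 := hneg (by omega)
    have ha : x0 = ((x0.toNat : Nat) : Int) := by omega
    have hn : x1 + 1 = ((x0.toNat : Nat) : Int) + (((x1 + 1 - x0).toNat : Nat) : Int) := by omega
    rw [show PySem.List.pyRange x0 (x1 + 1)
        = PySem.List.pyRange ((x0.toNat : Nat) : Int)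
            (((x0.toNat : Nat) : Int) + (((x1 + 1 - x0).toNat : Nat) : Int)) by rw [← hn, ← ha]]
    rw [loop_closed num mi ((x1 + 1 - x0).toNat) x0.toNat 0 (by omega)]
    rw [show (x1 - x0 + 1).toNat = (x1 + 1 - x0).toNat by omega]
    rw [show num >>> x0.toNat = num / 2 ^ x0.toNat by
      rw [Int.shiftRight_eq_div_pow]; norm_num]
    rw [show ((1:Int) <<< (x1 + 1 - x0).toNat) = 2 ^ (x1 + 1 - x0).toNat by
      rw [Int.shiftLeft_eq, one_mul]]
    rw [PySem.Int.mod_eq_emod_of_pos (by positivity)]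
    rw [Int.shiftLeft_eq]
    rw [show (x0 - mi).toNat = (((x0.toNat : Nat) : Int) - mi).toNat by omega]
    ring
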